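-- pv_equiv track=rewrite | github.com/Monarch428/BrandingBeez-official | ai_engine/app/pipeline/domain_intents.py | infer_business_type
-- ===== SOURCE A (Python) =====
-- from typing import Dict, List, Optional, Tuple
--
-- def _norm(s: Optional[str]) -> str:
--     return (s or "").strip().lower()
--
-- def infer_business_type(primary_service_industry: Optional[str], homepage_text: Optional[str] = None) -> str:
--     """Infer a coarse business type to guide crawling.
--
--     We intentionally keep this *rule-based* to avoid JSON parsing failures and
--     prevent LLM from becoming a single point of failure.
--     """
--     psi = _norm(primary_service_industry)
--     home = _norm(homepage_text)
--
--     # Bakery / Cafe / Restaurant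
--     if any(k in psi for k in ["bakery", "cafe", "coffee", "restaurant", "food", "pizza", "bar", "catering"]) or        any(k in home for k in ["menu", "order online", "catering", "reserve a table", "book a table", "hours", "our menu"]):
--         return "local_food"
--
--     # Medical / Dental / Ortho / Clinic
--     if any(k in psi for k in ["orthodont", "dental", "dentist", "clinic", "hospital", "doctor", "medical", "dermat", "physio", "therapy"]) or        any(k in home for k in ["book an appointment", "patient", "treatments", "insurance", "schedule a visit"]):
--         return "local_health"
--
--     # Salon / Spa / Beauty
--     if any(k in psi for k in ["salon", "spa", "beauty", "barber", "hair", "nail", "makeup"]) or        any(k in home for k in ["book now", "services & pricing", "stylists"]):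
--         return "local_beauty"
--
--     # Ecommerce / Shop
--     if any(k in psi for k in ["ecommerce", "shop", "store", "retail"]) or        any(k in home for k in ["add to cart", "cart", "checkout", "collections", "shipping", "returns"]):
--         return "ecommerce"
--
--     # SaaS / Software
--     if any(k in psi for k in ["saas", "software", "app", "platform", "cloud", "automation"]) or        any(k in home for k in ["pricing", "book a demo", "request a demo", "features", "integrations"]):
--         return "saas"
--
--     # Default: agency/professional services
--     return "agency_services"
-- ===== SOURCE B (Python) =====
-- from typing import Optional
--
-- def _norm(s: Optional[str]) -> str:
--     return (s or "").strip().lower()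
--
-- _LABELS = ["local_food", "local_health", "local_beauty", "ecommerce", "saas"]
--
-- # Flattened inverted keyword index: keyword -> (priority, label), priority = rule rank.
-- _PSI_INDEX = (
--     [(k, 0) for k in ["bakery", "cafe", "coffee", "restaurant", "food", "pizza", "bar", "catering"]]
--     + [(k, 1) for k in ["orthodont", "dental", "dentist", "clinic", "hospital", "doctor", "medical", "dermat", "physio", "therapy"]]
--     + [(k, 2) for k in ["salon", "spa", "beauty", "barber", "hair", "nail", "makeup"]]
--     + [(k, 3) for k in ["ecommerce", "shop", "store", "retail"]]
--     + [(k, 4) for k in ["saas", "software", "app", "platform", "cloud", "automation"]]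
-- )
--
-- _HOME_INDEX = (
--     [(k, 0) for k in ["menu", "order online", "catering", "reserve a table", "book a table", "hours", "our menu"]]
--     + [(k, 1) for k in ["book an appointment", "patient", "treatments", "insurance", "schedule a visit"]]
--     + [(k, 2) for k in ["book now", "services & pricing", "stylists"]]
--     + [(k, 3) for k in ["add to cart", "cart", "checkout", "collections", "shipping", "returns"]]
--     + [(k, 4) for k in ["pricing", "book a demo", "request a demo", "features", "integrations"]]
-- )
--
-- def infer_business_type(primary_service_industry: Optional[str], homepage_text: Optional[str] = None) -> str:
--     """Scan every keyword of a flat inverted index once, keeping the best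
--     (lowest) matched rule priority; no per-rule checks and no early return."""
--     psi = _norm(primary_service_industry)
--     home = _norm(homepage_text)
--     best = None
--     for kw, p in _PSI_INDEX:
--         if kw in psi and (best is None or p < best):
--             best = p
--     for kw, p in _HOME_INDEX:
--         if kw in home and (best is None or p < best):
--             best = p
--     return _LABELS[best] if best is not None else "agency_services"
-- ===== Notes on version B (the rewrite author's own statement) =====
-- stated objective: alternative
-- what changed: Replaced the ordered chain of per-rule short-circuit checks with a flat inverted keyword index scanned exhaustively once, accumulating the minimum matched rule priority and mapping it to its label at the end.
import Mathlib
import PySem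

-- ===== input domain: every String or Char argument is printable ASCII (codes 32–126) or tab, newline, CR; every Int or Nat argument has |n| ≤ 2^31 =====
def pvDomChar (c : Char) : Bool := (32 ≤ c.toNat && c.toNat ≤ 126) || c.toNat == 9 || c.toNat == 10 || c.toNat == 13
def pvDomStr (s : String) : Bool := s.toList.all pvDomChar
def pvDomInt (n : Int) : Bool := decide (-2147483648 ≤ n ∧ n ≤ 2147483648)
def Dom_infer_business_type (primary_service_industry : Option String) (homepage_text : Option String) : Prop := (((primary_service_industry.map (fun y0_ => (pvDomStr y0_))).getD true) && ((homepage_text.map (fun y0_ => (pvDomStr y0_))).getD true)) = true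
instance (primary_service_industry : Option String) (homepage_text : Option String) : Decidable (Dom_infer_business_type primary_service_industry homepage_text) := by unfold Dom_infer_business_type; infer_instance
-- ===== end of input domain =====

-- B replaces the ordered per-rule short-circuit checks with a flat inverted keyword index
-- scanned exhaustively, accumulating the minimum matched rule priority (objective: alternative).


-- ===== PORT A =====
-- _norm(s) = (s or "").strip().lower()
def pvNorm (s : Option String) : String :=
  PySem.Str.lower (PySem.Str.strip (s.getD ""))

def infer_business_type (primary_service_industry : Option String) (homepage_text : Option String) : String :=
  if ["bakery", "cafe", "coffee", "restaurant", "food", "pizza", "bar", "catering"].any (fun k => PySem.Str.isIn k (pvNorm primary_service_industry)) ||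
     ["menu", "order online", "catering", "reserve a table", "book a table", "hours", "our menu"].any (fun k => PySem.Str.isIn k (pvNorm homepage_text)) then
    "local_food"
  else if ["orthodont", "dental", "dentist", "clinic", "hospital", "doctor", "medical", "dermat", "physio", "therapy"].any (fun k => PySem.Str.isIn k (pvNorm primary_service_industry)) ||
     ["book an appointment", "patient", "treatments", "insurance", "schedule a visit"].any (fun k => PySem.Str.isIn k (pvNorm homepage_text)) then
    "local_health"
  else if ["salon", "spa", "beauty", "barber", "hair", "nail", "makeup"].any (fun k => PySem.Str.isIn k (pvNorm primary_service_industry)) ||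
     ["book now", "services & pricing", "stylists"].any (fun k => PySem.Str.isIn k (pvNorm homepage_text)) then
    "local_beauty"
  else if ["ecommerce", "shop", "store", "retail"].any (fun k => PySem.Str.isIn k (pvNorm primary_service_industry)) ||
     ["add to cart", "cart", "checkout", "collections", "shipping", "returns"].any (fun k => PySem.Str.isIn k (pvNorm homepage_text)) then
    "ecommerce"
  else if ["saas", "software", "app", "platform", "cloud", "automation"].any (fun k => PySem.Str.isIn k (pvNorm primary_service_industry)) ||
     ["pricing", "book a demo", "request a demo", "features", "integrations"].any (fun k => PySem.Str.isIn k (pvNorm homepage_text)) then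
    "saas"
  else
    "agency_services"

-- ===== PORT B =====
def pvLabels : List String := ["local_food", "local_health", "local_beauty", "ecommerce", "saas"]

-- _PSI_INDEX / _HOME_INDEX: flat inverted keyword indexes built from per-priority comprehensions
def pvPsiIndex : List (String × Nat) :=
  (["bakery", "cafe", "coffee", "restaurant", "food", "pizza", "bar", "catering"].map (fun k => (k, 0)))
  ++ (["orthodont", "dental", "dentist", "clinic", "hospital", "doctor", "medical", "dermat", "physio", "therapy"].map (fun k => (k, 1)))
  ++ (["salon", "spa", "beauty", "barber", "hair", "nail", "makeup"].map (fun k => (k, 2)))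
  ++ (["ecommerce", "shop", "store", "retail"].map (fun k => (k, 3)))
  ++ (["saas", "software", "app", "platform", "cloud", "automation"].map (fun k => (k, 4)))

def pvHomeIndex : List (String × Nat) :=
  (["menu", "order online", "catering", "reserve a table", "book a table", "hours", "our menu"].map (fun k => (k, 0)))
  ++ (["book an appointment", "patient", "treatments", "insurance", "schedule a visit"].map (fun k => (k, 1)))
  ++ (["book now", "services & pricing", "stylists"].map (fun k => (k, 2)))
  ++ (["add to cart", "cart", "checkout", "collections", "shipping", "returns"].map (fun k => (k, 3)))
  ++ (["pricing", "book a demo", "request a demo", "features", "integrations"].map (fun k => (k, 4)))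

-- one step of the loop body: 'if kw in t and (best is None or p < best): best = p'
def pvStep (t : String) (acc : Option Nat) (e : String × Nat) : Option Nat :=
  if PySem.Str.isIn e.1 t && (match acc with | none => true | some q => decide (e.2 < q)) then
    some e.2
  else acc

-- '_LABELS[best] if best is not None else "agency_services"' (best is always in range 0..4 here)
def pvFinalize (best : Option Nat) : String :=
  match best with
  | some p => pvLabels.getD p ""
  | none => "agency_services"

def infer_business_type_alt (primary_service_industry : Option String) (homepage_text : Option String) : String :=
  pvFinalize (pvHomeIndex.foldl (pvStep (pvNorm homepage_text))
                (pvPsiIndex.foldl (pvStep (pvNorm primary_service_industry)) none))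

-- ===== PRECONDITION & SPEC =====
def Spec_infer_business_type (primary_service_industry : Option String) (homepage_text : Option String) (out : String) : Prop := out = infer_business_type_alt primary_service_industry homepage_text
instance (primary_service_industry : Option String) (homepage_text : Option String) (out : String) : Decidable (Spec_infer_business_type primary_service_industry homepage_text out) := by unfold Spec_infer_business_type; infer_instance

-- ===== CLAIM (what is proved, stated in full; the proofs are below) =====
def Claim_equal_infer_business_type : Prop := ∀ (primary_service_industry : Option String) (homepage_text : Option String), Dom_infer_business_type primary_service_industry homepage_text → Spec_infer_business_type primary_service_industry homepage_text (infer_business_type primary_service_industry homepage_text)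

-- ===== LEMMAS AND PROOFS =====

-- conditional min-insertion of a priority
def pvC (b : Bool) (p : Nat) (acc : Option Nat) : Option Nat :=
  if b then (match acc with | none => some p | some q => if p < q then some p else some q) else acc

-- once the accumulator holds a priority ≤ p, a segment of priority-p entries leaves it unchanged
theorem pvStep_stay (t : String) (p : Nat) (ks : List String) (q : Nat) (hq : q ≤ p) :
    (ks.map (fun k => (k, p))).foldl (pvStep t) (some q) = some q := by
  induction ks with
  | nil => rfl
  | cons k ks ih =>
    simp only [List.map_cons, List.foldl_cons, pvStep]
    have : ¬ p < q := Nat.not_lt.mpr hq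
    simp [this, ih]

-- folding one keyword segment = conditional min-insertion of its priority
theorem pvSeg (t : String) (ks : List String) (p : Nat) (acc : Option Nat) :
    (ks.map (fun k => (k, p))).foldl (pvStep t) acc
      = pvC (ks.any (fun k => PySem.Str.isIn k t)) p acc := by
  induction ks generalizing acc with
  | nil => simp [pvC]
  | cons k ks ih =>
    simp only [List.map_cons, List.foldl_cons, List.any_cons]
    by_cases hin : PySem.Str.isIn k t
    all_goals simp only [PySem.Str.isIn] at hin
    · cases acc with
      | none =>
        simp [pvStep, hin, pvC, pvStep_stay t p ks p (Nat.le_refl p)]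
      | some q =>
        by_cases hpq : p < q
        · simp [pvStep, hin, hpq, pvC, pvStep_stay t p ks p (Nat.le_refl p)]
        · simp [pvStep, hin, hpq, pvC, pvStep_stay t p ks q (Nat.not_lt.mp hpq)]
    · simp [pvStep, hin, ih]

-- the min-priority accumulation over the ten segments equals A's ordered first-match chain
theorem pvKey (b0 b1 b2 b3 b4 d0 d1 d2 d3 d4 : Bool) :
    pvFinalize (pvC d4 4 (pvC d3 3 (pvC d2 2 (pvC d1 1 (pvC d0 0
      (pvC b4 4 (pvC b3 3 (pvC b2 2 (pvC b1 1 (pvC b0 0 none))))))))))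
      = (if b0 || d0 then "local_food"
         else if b1 || d1 then "local_health"
         else if b2 || d2 then "local_beauty"
         else if b3 || d3 then "ecommerce"
         else if b4 || d4 then "saas"
         else "agency_services") := by
  cases b0 <;> cases b1 <;> cases b2 <;> cases b3 <;> cases b4 <;>
    cases d0 <;> cases d1 <;> cases d2 <;> cases d3 <;> cases d4 <;> rfl

-- ===== VERDICT (by name: the statement is the Claim_ definition above) =====
theorem infer_business_type_spec : Claim_equal_infer_business_type := by
  intro x y _
  unfold Spec_infer_business_type infer_business_type infer_business_type_alt pvPsiIndex pvHomeIndex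
  simp only [List.foldl_append, pvSeg]
  exact (pvKey _ _ _ _ _ _ _ _ _ _).symm
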